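-- pv_equiv track=rewrite | github.com/jeff87654/Lifting | audit_partition_coverage.py | enumerate_combos
-- ===== SOURCE A (Python) =====
-- from collections import Counter
--
-- NTG = {
--     2: 1, 3: 2, 4: 5, 5: 5, 6: 16, 7: 7, 8: 50, 9: 34, 10: 45,
--     11: 8, 12: 301, 13: 9, 14: 63, 15: 104, 16: 1954, 17: 10, 18: 983,
--     19: 8, 20: 1117,
-- }
--
-- def enumerate_combos(partition):
--     """Generate all canonical combo strings for a partition.
--     A combo is an assignment of t_i in 1..NTG(d_i) for each part d_i, with
--     the constraint that within each block of equal parts, the t-list is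
--     weakly increasing (canonical multiset rep).
--     """
--     parts = Counter(partition)
--     # Build's filename convention: parts ASCENDING by degree, then t-values
--     # ascending within each block of equal parts.
--     distinct_parts = sorted(parts.items(), key=lambda kv: kv[0])
--
--     def gen_block(d, m):
--         if m == 0:
--             yield ()
--             return
--         n = NTG[d]
--         def rec(remaining, min_t):
--             if remaining == 0:
--                 yield ()
--                 return
--             for t in range(min_t, n + 1):
--                 for tail in rec(remaining - 1, t):
--                     yield (t,) + tail
--         for ts in rec(m, 1):
--             yield ts
--
--     def gen_all(idx):
--         if idx == len(distinct_parts):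
--             yield []
--             return
--         d, m = distinct_parts[idx]
--         for ts in gen_block(d, m):
--             block = [(d, t) for t in ts]
--             for rest in gen_all(idx + 1):
--                 yield block + rest
--
--     for combo in gen_all(0):
--         s = "_".join(f"[{d},{t}]" for d, t in combo)
--         yield s
-- ===== SOURCE B (Python) =====
-- from itertools import combinations_with_replacement, product
--
-- NTG = {
--     2: 1, 3: 2, 4: 5, 5: 5, 6: 16, 7: 7, 8: 50, 9: 34, 10: 45,
--     11: 8, 12: 301, 13: 9, 14: 63, 15: 104, 16: 1954, 17: 10, 18: 983,
--     19: 8, 20: 1117,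
-- }
--
-- def enumerate_combos(partition):
--     """Same combos via itertools: one combinations_with_replacement per
--     block of equal parts, a single product over the blocks."""
--     degrees = sorted(set(partition))
--     blocks = [(d, partition.count(d)) for d in degrees]
--     for choice in product(*(combinations_with_replacement(range(1, NTG[d] + 1), m)
--                             for d, m in blocks)):
--         yield "_".join(f"[{d},{t}]"
--                        for (d, _), ts in zip(blocks, choice)
--                        for t in ts)
-- ===== Notes on version B (the rewrite author's own statement) =====
-- stated objective: idiomatic
-- what changed: The two hand-rolled recursive generators (rec over min_t, gen_all over block index) are replaced by the itertools decomposition: one combinations_with_replacement(range(1, NTG[d]+1), m) per block of equal parts and a single product over the blocks, with blocks built from sorted(set(partition)) and list.count instead of Counter.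
import Mathlib
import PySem

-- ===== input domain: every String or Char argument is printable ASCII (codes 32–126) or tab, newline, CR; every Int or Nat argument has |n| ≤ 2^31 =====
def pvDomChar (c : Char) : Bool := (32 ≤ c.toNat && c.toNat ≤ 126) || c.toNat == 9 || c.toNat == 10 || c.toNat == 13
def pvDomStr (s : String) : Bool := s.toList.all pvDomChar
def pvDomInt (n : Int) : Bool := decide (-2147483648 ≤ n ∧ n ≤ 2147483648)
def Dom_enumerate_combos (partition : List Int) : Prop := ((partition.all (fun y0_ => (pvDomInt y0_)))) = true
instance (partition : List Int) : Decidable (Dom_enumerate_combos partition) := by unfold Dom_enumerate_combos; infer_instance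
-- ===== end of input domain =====

-- B replaces A's two hand-rolled recursive generators by the itertools decomposition:
-- combinations-with-replacement per block of equal parts, then one Cartesian product over the blocks.

-- shared module constant NTG
def pvNTG : PySem.Dict Int Int := PySem.Dict.ofList
  [(2,1),(3,2),(4,5),(5,5),(6,16),(7,7),(8,50),(9,34),(10,45),
   (11,8),(12,301),(13,9),(14,63),(15,104),(16,1954),(17,10),(18,983),
   (19,8),(20,1117)]

-- NTG[d]; Python raises KeyError on a missing key — those inputs are excluded by Pre_
def pvNTGget (d : Int) : Int := pvNTG.getD d 0

-- ===== PORT A =====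
-- rec(remaining, min_t) inside gen_block (remaining is the nonnegative count, carried as fuel)
def pvRecA (n : Int) : Nat → Int → List (List Int)
  | 0, _ => [[]]
  | r + 1, minT =>
      (PySem.List.pyRange minT (n + 1) 1).flatMap
        (fun t => (pvRecA n r t).map (fun tail => t :: tail))

-- gen_block(d, m)
def pvGenBlock (d m : Int) : List (List Int) :=
  if m = 0 then [[]] else pvRecA (pvNTGget d) m.toNat 1

-- gen_all(idx), as structural recursion over distinct_parts[idx:]
def pvGenAll : List (Int × Int) → List (List (Int × Int))
  | [] => [[]]
  | (d, m) :: rest =>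
      (pvGenBlock d m).flatMap (fun ts =>
        (pvGenAll rest).map (fun r => ts.map (fun t => (d, t)) ++ r))

-- "_".join(f"[{d},{t}]" for d, t in combo)
def pvFmtA (combo : List (Int × Int)) : String :=
  PySem.Str.join "_" (combo.map (fun p =>
    "[" ++ PySem.Int.toStr p.1 ++ "," ++ PySem.Int.toStr p.2 ++ "]"))

def enumerate_combos (partition : List Int) : List String :=
  let distinct_parts :=
    PySem.List.sorted (PySem.Dict.counter partition).items (fun kv => kv.1) false
  (pvGenAll distinct_parts).map pvFmtA

-- ===== PORT B =====
-- itertools.combinations_with_replacement(pool, m)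
def pvCWR (pool : List Int) (m : Nat) : List (List Int) :=
  match m, pool with
  | 0, _ => [[]]
  | _ + 1, [] => []
  | m + 1, x :: xs =>
      (pvCWR (x :: xs) m).map (fun c => x :: c) ++ pvCWR xs (m + 1)
termination_by (m, pool.length)

-- itertools.product(*iterables) (rightmost varies fastest)
def pvProd : List (List (List Int)) → List (List (List Int))
  | [] => [[]]
  | l :: rest => l.flatMap (fun x => (pvProd rest).map (fun ch => x :: ch))

def enumerate_combos_alt (partition : List Int) : List String :=
  let degrees := PySem.List.sorted (PySem.Set.ofList partition) (fun x => x) false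
  let blocks := degrees.map (fun d => (d, (partition.count d : Int)))
  (pvProd (blocks.map (fun dm =>
      pvCWR (PySem.List.pyRange 1 (pvNTGget dm.1 + 1) 1) dm.2.toNat))).map
    (fun choice =>
      PySem.Str.join "_" ((blocks.zip choice).flatMap (fun bt =>
        bt.2.map (fun t =>
          "[" ++ PySem.Int.toStr bt.1.1 ++ "," ++ PySem.Int.toStr t ++ "]"))))

-- ===== PRECONDITION & SPEC =====
-- Pre_ excludes exactly the inputs where Python A raises KeyError: a part that is not a key of NTG (keys are 2..20).
def Pre_enumerate_combos (partition : List Int) : Prop :=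
  ∀ d ∈ partition, 2 ≤ d ∧ d ≤ 20
instance (partition : List Int) : Decidable (Pre_enumerate_combos partition) := by
  unfold Pre_enumerate_combos; infer_instance

def pvWitness_enumerate_combos : List Int := [2, 3, 3]

def Spec_enumerate_combos (partition : List Int) (out : List String) : Prop := out = enumerate_combos_alt partition
instance (partition : List Int) (out : List String) : Decidable (Spec_enumerate_combos partition out) := by unfold Spec_enumerate_combos; infer_instance

-- ===== CLAIM (what is proved, stated in full; the proofs are below) =====
def Claim_equal_enumerate_combos : Prop := ∀ (partition : List Int), Dom_enumerate_combos partition → Pre_enumerate_combos partition → Spec_enumerate_combos partition (enumerate_combos partition)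

-- ===== LEMMAS AND PROOFS =====

-- cwr over an ascending integer range satisfies A's rec recurrence
theorem pvCWR_pyRange_succ (b : Int) (m : Nat) :
    ∀ a, pvCWR (PySem.List.pyRange a b 1) (m + 1) =
      (PySem.List.pyRange a b 1).flatMap
        (fun t => (pvCWR (PySem.List.pyRange t b 1) m).map (fun c => t :: c)) := by
  have key : ∀ k a, (b - a).toNat ≤ k →
      pvCWR (PySem.List.pyRange a b 1) (m + 1) =
        (PySem.List.pyRange a b 1).flatMap
          (fun t => (pvCWR (PySem.List.pyRange t b 1) m).map (fun c => t :: c)) := by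
    intro k
    induction k with
    | zero =>
        intro a hk
        rw [PySem.List.pyRange_one_eq_nil (by omega)]
        simp [pvCWR]
    | succ k ih =>
        intro a hk
        by_cases h : a < b
        · rw [PySem.List.pyRange_one_cons h, List.flatMap_cons]
          rw [pvCWR, ih (a + 1) (by omega), PySem.List.pyRange_one_cons h]
        · rw [PySem.List.pyRange_one_eq_nil (by omega)]
          simp [pvCWR]
  intro a
  exact key (b - a).toNat a le_rfl

-- A's rec(m, a) = combinations_with_replacement(range(a, n+1), m)
theorem pvRecA_eq_pvCWR (n : Int) (m : Nat) :
    ∀ a, pvRecA n m a = pvCWR (PySem.List.pyRange a (n + 1) 1) m := by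
  induction m with
  | zero => intro a; simp [pvRecA, pvCWR]
  | succ r ih =>
      intro a
      rw [pvCWR_pyRange_succ]
      simp only [pvRecA, ih]

theorem pvGenBlock_eq (d m : Int) :
    pvGenBlock d m = pvCWR (PySem.List.pyRange 1 (pvNTGget d + 1) 1) m.toNat := by
  unfold pvGenBlock
  split
  · next h => subst h; simp [pvCWR]
  · exact pvRecA_eq_pvCWR _ _ 1

-- gen_all = product of the per-block lists, flattened to (d,t) pairs
theorem pvGenAll_eq (bs : List (Int × Int)) :
    pvGenAll bs =
      (pvProd (bs.map (fun dm =>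
        pvCWR (PySem.List.pyRange 1 (pvNTGget dm.1 + 1) 1) dm.2.toNat))).map
        (fun choice => (bs.zip choice).flatMap
          (fun bt => bt.2.map (fun t => (bt.1.1, t)))) := by
  induction bs with
  | nil => rfl
  | cons dm rest ih =>
      obtain ⟨d, m⟩ := dm
      simp only [pvGenAll, List.map_cons, pvProd, pvGenBlock_eq, ih,
        List.map_flatMap, List.map_map]
      simp [Function.comp_def]

-- A's sorted counter items = B's blocks
theorem pvBlocks_eq (partition : List Int) :
    PySem.List.sorted (PySem.Dict.counter partition).items (fun kv => kv.1) false =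
      (PySem.List.sorted (PySem.Set.ofList partition) (fun x => x) false).map
        (fun d => (d, (partition.count d : Int))) := by
  rw [PySem.Dict.items_counter]
  apply PySem.List.sorted_eq_of_perm_of_pairwise_lt
  · exact List.Perm.map _ (PySem.List.sorted_perm _ _ _)
  · exact List.Pairwise.map _ (fun a b h => h)
      (PySem.List.sorted_ofList_pairwise_lt partition)

-- ===== VERDICT (by name: the statement is the Claim_ definition above) =====
theorem enumerate_combos_spec : Claim_equal_enumerate_combos := by
  intro partition _ _
  show enumerate_combos partition = enumerate_combos_alt partition
  unfold enumerate_combos enumerate_combos_alt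
  rw [pvBlocks_eq]
  dsimp only
  rw [pvGenAll_eq]
  simp [pvFmtA, List.map_map, Function.comp_def, List.map_flatMap]
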